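-- pv_equiv track=rewrite | github.com/hugomes21/EngWeb2024 | TPC3/dbCreation.py | calc_generos
-- ===== SOURCE A (Python) =====
-- def pertence_ID(lista, valor, campo):
--     encontrado = False
--     i = 0
--     while i < len(lista) and not encontrado:
--         if lista[i][campo] == valor:
--             encontrado = True
--         i += 1
--     return encontrado
--
-- def calc_generos(bd):
--     generos = []
--     contador = 1
--     for registo in bd:
--         genres = registo.get('genres')
--         if genres is not None:
--             for genre in genres:
--                 if not pertence_ID(generos, genre, 'name') and genre != '':
--                     generos.append({
--                         "id": f"g{contador}",
--                         "name": genre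
--                     })
--                     contador += 1
--     return generos
-- ===== SOURCE B (Python) =====
-- def calc_generos(bd):
--     # flatten all non-empty genre names in order
--     names = [g for r in bd for g in (r.get('genres') or []) if g != '']
--     # walk BACKWARDS overwriting, so each name ends up mapped to its FIRST index
--     first = {}
--     for i, g in reversed(list(enumerate(names))):
--         first[g] = i
--     # sort the distinct names by first-occurrence index, then assign ids
--     ordered = sorted(first.items(), key=lambda kv: kv[1])
--     return [{"id": f"g{k}", "name": n} for k, (n, _i) in enumerate(ordered, 1)]
-- ===== Notes on version B (the rewrite author's own statement) =====
-- stated objective: alternative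
-- what changed: B replaces A's interleaved nested scan (linear pertence_ID membership test over the growing output plus a counter) by a three-phase algorithm: flatten all non-empty names, build a name-to-first-index map by overwriting while walking the flat list BACKWARDS (no membership test at all), then sort the map items by first-occurrence index and enumerate ids.
import Mathlib
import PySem

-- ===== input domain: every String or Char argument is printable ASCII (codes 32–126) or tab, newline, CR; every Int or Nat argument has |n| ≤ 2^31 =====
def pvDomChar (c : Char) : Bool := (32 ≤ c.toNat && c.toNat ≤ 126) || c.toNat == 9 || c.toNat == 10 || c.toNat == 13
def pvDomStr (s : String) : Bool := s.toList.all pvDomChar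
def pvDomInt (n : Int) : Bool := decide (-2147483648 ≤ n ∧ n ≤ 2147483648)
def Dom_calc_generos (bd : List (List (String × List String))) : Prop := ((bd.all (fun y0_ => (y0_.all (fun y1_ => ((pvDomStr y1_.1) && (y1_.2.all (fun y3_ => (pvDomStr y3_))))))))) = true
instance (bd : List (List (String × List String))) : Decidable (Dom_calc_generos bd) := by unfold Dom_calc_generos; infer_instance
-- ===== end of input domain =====

-- B replaces A's interleaved membership-scan-and-append by three phases: flatten the
-- non-empty names, map each name to its first index by overwriting while walking the
-- flat list backwards, then sort the items by that index and enumerate ids.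

-- ===== PORT A =====
-- lista[i][campo] is ported via PySem.Dict.get?; in A's only use the key "name" is
-- always present, so the Option comparison is exact there.
def pertence_ID (lista : List (List (String × String))) (valor : String) (campo : String) : Bool :=
  -- the while-with-flag loop scans the list front to back and stops at the first hit;
  -- ported as the structural recursion over the remaining suffix
  match lista with
  | [] => false
  | d :: rest =>
      if PySem.Dict.get? (PySem.Dict.mk d) campo == some valor then true
      else pertence_ID rest valor campo

def calc_generos (bd : List (List (String × List String))) : List (List (String × String)) :=
  (bd.foldl (fun (st : List (List (String × String)) × Int) registo =>
      match PySem.Dict.get? (PySem.Dict.mk registo) "genres" with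
      | none => st
      | some genres =>
          genres.foldl (fun st genre =>
            if !pertence_ID st.1 genre "name" && genre != "" then
              (st.1 ++ [[("id", "g" ++ PySem.Int.toStr st.2), ("name", genre)]], st.2 + 1)
            else st) st)
    ([], 1)).1

-- ===== PORT B =====
def calc_generos_alt (bd : List (List (String × List String))) : List (List (String × String)) :=
  let names := bd.flatMap (fun r =>
    ((PySem.Dict.get? (PySem.Dict.mk r) "genres").getD []).filter (fun g => g != ""))
  let first := (PySem.List.enumerate names 0).reverse.foldl
      (fun (d : PySem.Dict String Int) p => d.insert p.2 p.1) PySem.Dict.empty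
  let ordered := PySem.List.sorted first.items (fun kv => kv.2)
  (PySem.List.enumerate ordered 1).map (fun p => [("id", "g" ++ PySem.Int.toStr p.1), ("name", p.2.1)])

-- ===== PRECONDITION & SPEC =====
def Spec_calc_generos (bd : List (List (String × List String))) (out : List (List (String × String))) : Prop := out = calc_generos_alt bd
instance (bd : List (List (String × List String))) (out : List (List (String × String))) : Decidable (Spec_calc_generos bd out) := by unfold Spec_calc_generos; infer_instance

-- ===== CLAIM (what is proved, stated in full; the proofs are below) =====
def Claim_equal_calc_generos : Prop := ∀ (bd : List (List (String × List String))), Dom_calc_generos bd → Spec_calc_generos bd (calc_generos bd)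

-- ===== LEMMAS AND PROOFS =====

-- the rendered output for a list of (already unique) names, ids starting at s
def pvRender (u : List String) (s : Int) : List (List (String × String)) :=
  (PySem.List.enumerate u s).map (fun p => [("id", "g" ++ PySem.Int.toStr p.1), ("name", p.2)])

lemma pvRender_cons (n : String) (u : List String) (s : Int) :
    pvRender (n :: u) s = [("id", "g" ++ PySem.Int.toStr s), ("name", n)] :: pvRender u (s + 1) := by
  simp [pvRender, PySem.List.enumerate_cons]

lemma pvRender_append_one (u : List String) (g : String) :
    pvRender (u ++ [g]) 1
      = pvRender u 1 ++ [[("id", "g" ++ PySem.Int.toStr ((u.length : Int) + 1)), ("name", g)]] := by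
  simp [pvRender, PySem.List.enumerate_append, PySem.List.enumerate_cons, add_comm]

lemma pertence_pvRender (u : List String) (s : Int) (v : String) :
    pertence_ID (pvRender u s) v "name" = decide (v ∈ u) := by
  induction u generalizing s with
  | nil => simp [pvRender, pertence_ID]
  | cons n rest ih =>
      rw [pvRender_cons]
      have hget : PySem.Dict.get? (PySem.Dict.mk [("id", "g" ++ PySem.Int.toStr s), ("name", n)]) "name" = some n := by
        simp [PySem.Dict.get?]
      simp only [pertence_ID, hget, ih (s + 1)]
      by_cases h : n = v
      · subst h; simp
      · have hb : (some n == some v) = false := by simpa using h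
        simp [hb, List.mem_cons, Ne.symm h]

-- one inner-loop step of A, named so the lemmas can speak about it
def pvStep (st : List (List (String × String)) × Int) (genre : String) :
    List (List (String × String)) × Int :=
  if !pertence_ID st.1 genre "name" && genre != "" then
    (st.1 ++ [[("id", "g" ++ PySem.Int.toStr st.2), ("name", genre)]], st.2 + 1)
  else st

-- B's dedup accumulation
def pvAddAll (u : List String) (l : List String) : List String :=
  l.foldl PySem.Set.add u

lemma pvAddAll_nil (u : List String) : pvAddAll u [] = u := rfl

lemma pvAddAll_append (u : List String) (l1 l2 : List String) :
    pvAddAll u (l1 ++ l2) = pvAddAll (pvAddAll u l1) l2 := by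
  simp [pvAddAll, List.foldl_append]

lemma pvInner (gs : List String) (u : List String) :
    gs.foldl pvStep (pvRender u 1, (u.length : Int) + 1)
      = (pvRender (pvAddAll u (gs.filter (fun g => g != ""))) 1,
         ((pvAddAll u (gs.filter (fun g => g != ""))).length : Int) + 1) := by
  induction gs generalizing u with
  | nil => simp [pvAddAll]
  | cons g rest ih =>
      by_cases hg : g = ""
      · subst hg
        have hstep : pvStep (pvRender u 1, (u.length : Int) + 1) "" = (pvRender u 1, (u.length : Int) + 1) := by
          simp [pvStep]
        simp only [List.foldl_cons, hstep, List.filter_cons]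
        simpa using ih u
      · have hfil : (g :: rest).filter (fun g => g != "") = g :: rest.filter (fun g => g != "") := by
          simp [hg]
        rw [hfil]
        by_cases hmem : g ∈ u
        · have hstep : pvStep (pvRender u 1, (u.length : Int) + 1) g = (pvRender u 1, (u.length : Int) + 1) := by
            simp [pvStep, pertence_pvRender, hmem]
          have hadd : PySem.Set.add u g = u := by
            simp [PySem.Set.add, PySem.Set.contains, hmem]
          simp only [List.foldl_cons, hstep, pvAddAll, List.foldl_cons, hadd]
          exact ih u
        · have hstep : pvStep (pvRender u 1, (u.length : Int) + 1) g
              = (pvRender (u ++ [g]) 1, ((u ++ [g]).length : Int) + 1) := by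
            simp only [pvStep, pertence_pvRender]
            rw [if_pos (by simp [hmem, hg])]
            rw [pvRender_append_one]
            simp
          have hadd : PySem.Set.add u g = u ++ [g] := by
            simp [PySem.Set.add, PySem.Set.contains, hmem]
          simp only [List.foldl_cons, hstep, pvAddAll, hadd]
          exact ih (u ++ [g])

def pvNames (bd : List (List (String × List String))) : List String :=
  bd.flatMap (fun r =>
    ((PySem.Dict.get? (PySem.Dict.mk r) "genres").getD []).filter (fun g => g != ""))

lemma pvOuter (bd : List (List (String × List String))) (u : List String) :
    bd.foldl (fun (st : List (List (String × String)) × Int) registo =>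
        match PySem.Dict.get? (PySem.Dict.mk registo) "genres" with
        | none => st
        | some genres => genres.foldl pvStep st)
      (pvRender u 1, (u.length : Int) + 1)
      = (pvRender (pvAddAll u (pvNames bd)) 1,
         ((pvAddAll u (pvNames bd)).length : Int) + 1) := by
  induction bd generalizing u with
  | nil => simp [pvNames, pvAddAll]
  | cons r rest ih =>
      simp only [List.foldl_cons, pvNames, List.flatMap_cons, pvAddAll_append]
      cases hr : PySem.Dict.get? (PySem.Dict.mk r) "genres" with
      | none =>
          simp only [Option.getD_none, List.filter_nil, pvAddAll_nil]
          exact ih u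
      | some gs =>
          simp only [Option.getD_some]
          rw [pvInner]
          exact ih _

-- ===== B-side lemmas =====

-- find? of the predicate "second component is k" on an enumeration picks the first index
lemma pvFind_enumerate (names : List String) (s : Int) (k : String) (h : k ∈ names) :
    (PySem.List.enumerate names s).find? (fun p => p.2 == k)
      = some (s + (names.idxOf k : Int), k) := by
  induction names generalizing s with
  | nil => cases h
  | cons x xs ih =>
      rw [PySem.List.enumerate_cons]
      by_cases hx : x = k
      · subst hx
        simp [List.idxOf_cons_self]
      · have hk : k ∈ xs := by
          rcases List.mem_cons.mp h with h' | h'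
          · exact absurd h'.symm hx
          · exact h'
        have hb : ((x == k) : Bool) = false := by simpa using hx
        have hidx : (x :: xs).idxOf k = xs.idxOf k + 1 := by
          simp [List.idxOf_cons, hb]
        rw [List.find?_cons]
        simp only [show (((s, x).2 == k) : Bool) = false from hb]
        rw [ih (s + 1) hk, hidx]
        congr 2
        push_cast
        ring

-- lookup after folding inserts: the LAST-written value, i.e. find? on the reversed list
lemma pvGet_fold (l : List (Int × String)) (d : PySem.Dict String Int) (k : String) :
    (l.foldl (fun d p => d.insert p.2 p.1) d).get? k
      = ((l.reverse.find? (fun p => p.2 == k)).map (·.1)).or (d.get? k) := by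
  induction l generalizing d with
  | nil => simp
  | cons p rest ih =>
      simp only [List.foldl_cons, List.reverse_cons, List.find?_append]
      rw [ih]
      cases hf : rest.reverse.find? (fun p => p.2 == k) with
      | some q => simp
      | none =>
          simp only [Option.map_none, Option.none_or]
          by_cases hk : k = p.2
          · subst hk
            simp
          · have hpk : p.2 ≠ k := fun h => hk h.symm
            simp [PySem.Dict.get?_insert, hk, hpk]

-- the backward-overwrite dict: its lookup is the FIRST index of a name
lemma pvGet_first (names : List String) (k : String) (h : k ∈ names) :
    ((PySem.List.enumerate names 0).reverse.foldl
        (fun (d : PySem.Dict String Int) p => d.insert p.2 p.1) PySem.Dict.empty).get? k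
      = some (names.idxOf k : Int) := by
  rw [pvGet_fold, List.reverse_reverse, pvFind_enumerate names 0 k h]
  simp

lemma pvKeys_fold (names : List String) :
    ((PySem.List.enumerate names 0).reverse.foldl
        (fun (d : PySem.Dict String Int) p => d.insert p.2 p.1) PySem.Dict.empty).keys
      = PySem.Set.ofList names.reverse := by
  have hk := PySem.Dict.keys_foldl_insert_key (l := (PySem.List.enumerate names 0).reverse)
      (key := fun p : Int × String => p.2) (f := fun (_ : PySem.Dict String Int) (p : Int × String) => p.1)
      (d := PySem.Dict.empty)
  rw [hk, PySem.Dict.keys_empty]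
  have : (PySem.List.enumerate names 0).reverse.map (fun p => p.2) = names.reverse := by
    rw [List.map_reverse, PySem.List.map_snd_enumerate]
  rw [this]
  rfl

-- first occurrences in a first-occurrence dedup are strictly increasing
lemma pvPairwise_ofList (names : List String) :
    (PySem.Set.ofList names).Pairwise (fun a b => names.idxOf a < names.idxOf b) := by
  induction names using List.reverseRecOn with
  | nil => simp [PySem.Set.ofList, PySem.Set.empty]
  | append_singleton xs x ih =>
      have hofl : PySem.Set.ofList (xs ++ [x]) = PySem.Set.add (PySem.Set.ofList xs) x := by
        simp [PySem.Set.ofList, List.foldl_append]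
      rw [hofl]
      have hmemS : ∀ a, a ∈ PySem.Set.ofList xs → a ∈ xs := fun a ha =>
        (PySem.Set.mem_ofList xs a).mp ha
      by_cases hx : x ∈ xs
      · have hadd : PySem.Set.add (PySem.Set.ofList xs) x = PySem.Set.ofList xs := by
          simp [PySem.Set.add, PySem.Set.contains, (PySem.Set.mem_ofList xs x).mpr hx]
        rw [hadd]
        refine ih.imp_of_mem ?_
        intro a b ha hb hab
        rw [List.idxOf_append, if_pos (hmemS a ha), List.idxOf_append, if_pos (hmemS b hb)]
        exact hab
      · have hxS : x ∉ PySem.Set.ofList xs := fun h => hx ((PySem.Set.mem_ofList xs x).mp h)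
        have hadd : PySem.Set.add (PySem.Set.ofList xs) x = PySem.Set.ofList xs ++ [x] := by
          simp [PySem.Set.add, PySem.Set.contains, hxS]
        rw [hadd, List.pairwise_append]
        refine ⟨ih.imp_of_mem ?_, List.pairwise_singleton _ _, ?_⟩
        · intro a b ha hb hab
          rw [List.idxOf_append, if_pos (hmemS a ha), List.idxOf_append, if_pos (hmemS b hb)]
          exact hab
        · intro a ha b hb
          rw [List.mem_singleton] at hb
          subst hb
          rw [List.idxOf_append, if_pos (hmemS a ha), List.idxOf_append, if_neg hx]
          have h1 : xs.idxOf a < xs.length := List.idxOf_lt_length_of_mem (hmemS a ha)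
          omega

-- enumerate commutes with map
lemma pvEnumerate_map {α β : Type} (g : α → β) (l : List α) (s : Int) :
    PySem.List.enumerate (l.map g) s = (PySem.List.enumerate l s).map (fun p => (p.1, g p.2)) := by
  induction l generalizing s with
  | nil => rfl
  | cons x xs ih => simp [PySem.List.enumerate_cons, ih]

-- the sorted items of the backward-overwrite dict are the deduped names with their first indices
lemma pvSorted_items (names : List String) :
    PySem.List.sorted
        ((PySem.List.enumerate names 0).reverse.foldl
          (fun (d : PySem.Dict String Int) p => d.insert p.2 p.1) PySem.Dict.empty).items
        (fun kv => kv.2)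
      = (PySem.Set.ofList names).map (fun n => (n, (names.idxOf n : Int))) := by
  set d := (PySem.List.enumerate names 0).reverse.foldl
      (fun (d : PySem.Dict String Int) p => d.insert p.2 p.1) PySem.Dict.empty with hd
  have hnodup : d.keys.Nodup := by
    apply PySem.Dict.nodup_keys_foldl_insert_key
    simp [PySem.Dict.keys_empty]
  have hkeys : d.keys = PySem.Set.ofList names.reverse := pvKeys_fold names
  have hitems : d.items = (PySem.Set.ofList names.reverse).map (fun n => (n, (names.idxOf n : Int))) := by
    rw [PySem.Dict.items_eq_map_keys d hnodup 0, hkeys]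
    apply List.map_congr_left
    intro k hk
    have hkm : k ∈ names := List.mem_reverse.mp ((PySem.Set.mem_ofList _ k).mp hk)
    rw [PySem.Dict.getD_eq_get?_getD, hd, pvGet_first names k hkm]
    rfl
  apply PySem.List.sorted_eq_of_perm_of_pairwise_lt
  · rw [hitems]
    apply List.Perm.map
    rw [List.perm_ext_iff_of_nodup (PySem.Set.nodup_ofList _) (PySem.Set.nodup_ofList _)]
    intro a
    rw [PySem.Set.mem_ofList, PySem.Set.mem_ofList, List.mem_reverse]
  · rw [List.pairwise_map]
    refine (pvPairwise_ofList names).imp ?_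
    intro a b hab
    show ((names.idxOf a : Int)) < ((names.idxOf b : Int))
    exact_mod_cast hab

-- ===== VERDICT (by name: the statement is the Claim_ definition above) =====
theorem calc_generos_spec : Claim_equal_calc_generos := by
  intro bd _
  show calc_generos bd = calc_generos_alt bd
  have hA : calc_generos bd = pvRender (pvAddAll [] (pvNames bd)) 1 :=
    congrArg Prod.fst (pvOuter bd [])
  have hB : calc_generos_alt bd
      = (PySem.List.enumerate
          (PySem.List.sorted
            ((PySem.List.enumerate (pvNames bd) 0).reverse.foldl
              (fun (d : PySem.Dict String Int) p => d.insert p.2 p.1) PySem.Dict.empty).items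
            (fun kv => kv.2)) 1).map
          (fun p => [("id", "g" ++ PySem.Int.toStr p.1), ("name", p.2.1)]) := rfl
  rw [hA, hB, pvSorted_items, pvEnumerate_map, List.map_map]
  have hof : pvAddAll [] (pvNames bd) = PySem.Set.ofList (pvNames bd) := rfl
  rw [hof]
  rfl
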